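-- pv_equiv track=rewrite | github.com/josephineding-2025/MultechRojak | backend/services/flagging/__init__.py | _handle_search_patterns
-- ===== SOURCE A (Python) =====
-- from typing import Any, Iterable, Optional
--
-- def _clean_handle(handle: Optional[str]) -> Optional[str]:
--     if handle is None:
--         return None
--     cleaned = handle.strip()
--     return cleaned or None
--
-- def normalize_handle(handle: Optional[str]) -> Optional[str]:
--     """
--     3. Add fuzzy matching for username lookup (handle variations like john88 vs j0hn88)
--     """
--     cleaned = _clean_handle(handle)
--     if cleaned is None:
--         return None
--
--     translation = str.maketrans(
--         {
--             "@": "",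
--             "0": "o",
--             "1": "l",
--             "3": "e",
--             "5": "s",
--             "7": "t",
--             "_": "",
--             ".": "",
--             "-": "",
--             " ": "",
--         }
--     )
--     return cleaned.lower().translate(translation)
--
-- def _handle_search_patterns(handle: Optional[str]) -> list[str]:
--     cleaned = _clean_handle(handle)
--     normalized = normalize_handle(handle)
--     if not cleaned and not normalized:
--         return []
--
--     patterns: list[str] = []
--     seen: set[str] = set()
--
--     def add_pattern(raw: Optional[str]) -> None:
--         if not raw:
--             return
--         candidate = raw.lower()
--         values = [candidate]
--         if len(candidate) > 4:
--             values.extend([candidate[:4], candidate[-4:]])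
--         for value in values:
--             if len(value) < 3:
--                 continue
--             pattern = f"%{value}%"
--             if pattern not in seen:
--                 seen.add(pattern)
--                 patterns.append(pattern)
--
--     add_pattern(cleaned)
--     add_pattern(normalized)
--     return patterns
-- ===== SOURCE B (Python) =====
-- from typing import Optional
--
-- _TRANS = str.maketrans(
--     {"@": "", "0": "o", "1": "l", "3": "e", "5": "s", "7": "t",
--      "_": "", ".": "", "-": "", " ": ""}
-- )
--
--
-- def _pats(v: str) -> list[str]:
--     # closed-form case analysis: the surviving LIKE patterns for one lowercase value
--     if len(v) < 3:
--         return []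
--     if len(v) <= 4:
--         return ["%" + v + "%"]
--     return ["%" + v + "%", "%" + v[:4] + "%", "%" + v[-4:] + "%"]
--
--
-- def _dedup(ps: list[str]) -> list[str]:
--     # recursive first-occurrence dedup: keep the head, drop its later copies, recurse
--     if not ps:
--         return []
--     head = ps[0]
--     return [head] + _dedup([p for p in ps[1:] if p != head])
--
--
-- def _handle_search_patterns(handle: Optional[str]) -> list[str]:
--     if handle is None:
--         return []
--     cleaned = handle.strip()
--     if not cleaned:
--         return []
--     normalized = cleaned.lower().translate(_TRANS)
--     return _dedup(_pats(cleaned.lower()) + _pats(normalized.lower()))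
-- ===== Notes on version B (the rewrite author's own statement) =====
-- stated objective: simpler
-- what changed: Replaces A's stateful nested add_pattern closure (per-candidate generate list, length-filter loop, seen-set dedup) with an early return when the stripped handle is empty, a closed-form three-case builder that yields each value's surviving LIKE patterns directly (no filter pass), and a recursive first-occurrence dedup that drops later copies of the head and recurses.
import Mathlib
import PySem

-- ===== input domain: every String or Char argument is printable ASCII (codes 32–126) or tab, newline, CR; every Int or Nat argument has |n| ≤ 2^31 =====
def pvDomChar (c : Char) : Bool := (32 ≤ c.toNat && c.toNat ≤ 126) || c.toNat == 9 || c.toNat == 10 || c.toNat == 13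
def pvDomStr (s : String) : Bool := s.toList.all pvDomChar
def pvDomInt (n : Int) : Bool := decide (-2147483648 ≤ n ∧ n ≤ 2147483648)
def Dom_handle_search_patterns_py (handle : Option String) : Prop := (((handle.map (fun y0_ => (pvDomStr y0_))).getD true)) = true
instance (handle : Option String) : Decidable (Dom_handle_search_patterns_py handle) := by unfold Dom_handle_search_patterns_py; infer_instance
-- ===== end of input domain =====

-- B replaces A's stateful nested add_pattern closure (generate/filter/seen-set per candidate) by an early None/empty return, a closed-form three-case pattern builder per value, and a recursive first-occurrence dedup; objective: simpler.


-- ===== PORT A =====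
-- _clean_handle: strip, '' becomes None
def clean_handle_py (handle : Option String) : Option String :=
  match handle with
  | none => none
  | some h =>
    let cleaned := PySem.Str.strip h
    if cleaned = "" then none else some cleaned

-- the maketrans table, char by char (exact: deletions map to [], replacements to a single char)
def pvTransChar (c : Char) : List Char :=
  if c = '@' ∨ c = '_' ∨ c = '.' ∨ c = '-' ∨ c = ' ' then []
  else if c = '0' then ['o']
  else if c = '1' then ['l']
  else if c = '3' then ['e']
  else if c = '5' then ['s']
  else if c = '7' then ['t']
  else [c]

-- normalize_handle: clean, lower, translate (str.translate ported by hand via pvTransChar; exact)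
def normalize_handle_py (handle : Option String) : Option String :=
  match clean_handle_py handle with
  | none => none
  | some cleaned => some (String.ofList ((PySem.Str.lower cleaned).toList.flatMap pvTransChar))

-- the nested add_pattern closure, threading (patterns, seen)
def addPattern_py (st : List String × PySem.Set String) (raw : Option String) :
    List String × PySem.Set String :=
  match raw with
  | none => st
  | some r =>
    if r = "" then st
    else
      let candidate := PySem.Str.lower r
      let values :=
        if 4 < PySem.Str.len candidate then
          [candidate, PySem.Str.slice candidate none (some 4),
            PySem.Str.slice candidate (some (-4)) none]
        else [candidate]
      values.foldl
        (fun st value =>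
          if PySem.Str.len value < 3 then st
          else
            let pattern := "%" ++ value ++ "%"
            if PySem.Set.contains st.2 pattern then st
            else (st.1 ++ [pattern], PySem.Set.add st.2 pattern))
        st

def handle_search_patterns_py (handle : Option String) : List String :=
  let cleaned := clean_handle_py handle
  let normalized := normalize_handle_py handle
  if cleaned.getD "" = "" ∧ normalized.getD "" = "" then []
  else
    let st₁ := addPattern_py ([], PySem.Set.empty) cleaned
    let st₂ := addPattern_py st₁ normalized
    st₂.1

-- ===== PORT B =====
-- closed-form case analysis: the surviving LIKE patterns for one lowercase value
def altPats (v : String) : List String :=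
  if PySem.Str.len v < 3 then []
  else if PySem.Str.len v ≤ 4 then ["%" ++ v ++ "%"]
  else ["%" ++ v ++ "%",
        "%" ++ PySem.Str.slice v none (some 4) ++ "%",
        "%" ++ PySem.Str.slice v (some (-4)) none ++ "%"]

-- recursive first-occurrence dedup: keep the head, drop its later copies, recurse
def altDedup : List String → List String
  | [] => []
  | h :: t => h :: altDedup (t.filter (fun p => p != h))
  termination_by ps => ps.length
  decreasing_by
    simp only [List.length_cons, List.length_unattach]
    exact Nat.lt_succ_of_le (le_trans (List.length_filter_le _ _) (by simp))

def handle_search_patterns_py_alt (handle : Option String) : List String :=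
  match handle with
  | none => []
  | some h =>
    let cleaned := PySem.Str.strip h
    if cleaned = "" then []
    else
      let normalized :=
        String.ofList ((PySem.Str.lower cleaned).toList.flatMap pvTransChar)
      altDedup (altPats (PySem.Str.lower cleaned) ++ altPats (PySem.Str.lower normalized))

-- ===== PRECONDITION & SPEC =====
def Spec_handle_search_patterns_py (handle : Option String) (out : List String) : Prop := out = handle_search_patterns_py_alt handle
instance (handle : Option String) (out : List String) : Decidable (Spec_handle_search_patterns_py handle out) := by unfold Spec_handle_search_patterns_py; infer_instance

-- ===== CLAIM (what is proved, stated in full; the proofs are below) =====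
def Claim_equal_handle_search_patterns_py : Prop := ∀ (handle : Option String), Dom_handle_search_patterns_py handle → Spec_handle_search_patterns_py handle (handle_search_patterns_py handle)

-- ===== LEMMAS AND PROOFS =====

-- the values A's add_pattern builds for one source
def pvValues (src : Option String) : List String :=
  match src with
  | none => []
  | some r =>
    if r = "" then []
    else
      let v := PySem.Str.lower r
      if 4 < PySem.Str.len v then
        [v, PySem.Str.slice v none (some 4), PySem.Str.slice v (some (-4)) none]
      else [v]

-- A's seen-set loop over wrapped patterns computes an ordered dedup (Set.update)
lemma seenFold (ps : List String) (l : List String) :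
    ps.foldl
      (fun st p =>
        if PySem.Set.contains st.2 p then st
        else (st.1 ++ [p], PySem.Set.add st.2 p))
      (l, PySem.Set.ofList l)
    = (PySem.Set.update l ps, PySem.Set.ofList (PySem.Set.update l ps)) := by
  induction ps generalizing l with
  | nil => rw [PySem.Set.update_nil]; rfl
  | cons p ps ih =>
    simp only [List.foldl_cons]
    rw [PySem.Set.update_cons]
    by_cases hp : p ∈ l
    · have hc : PySem.Set.contains (PySem.Set.ofList l) p = true := by
        rw [PySem.Set.contains_iff, PySem.Set.mem_ofList]; exact hp
      rw [if_pos hc, PySem.Set.add_of_mem hp]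
      exact ih l
    · have hc : PySem.Set.contains (PySem.Set.ofList l) p = false := by
        rw [← Bool.not_eq_true, PySem.Set.contains_iff, PySem.Set.mem_ofList]; exact hp
      rw [hc]
      simp only [Bool.false_eq_true, if_false]
      have h1 : PySem.Set.add l p = l ++ [p] := PySem.Set.add_of_not_mem hp
      have h2 : PySem.Set.add (PySem.Set.ofList l) p = PySem.Set.ofList (l ++ [p]) := by
        rw [PySem.Set.ofList_append_singleton]
      rw [h1, h2]
      exact ih (l ++ [p])

-- A's inner loop over values = the seen-fold over the filtered, wrapped values
lemma innerFold_eq (values : List String) (st : List String × PySem.Set String) :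
    values.foldl
      (fun st value =>
        if PySem.Str.len value < 3 then st
        else
          let pattern := "%" ++ value ++ "%"
          if PySem.Set.contains st.2 pattern then st
          else (st.1 ++ [pattern], PySem.Set.add st.2 pattern))
      st
    = ((values.filter (fun v => 3 ≤ PySem.Str.len v)).map (fun v => "%" ++ v ++ "%")).foldl
        (fun st p =>
          if PySem.Set.contains st.2 p then st
          else (st.1 ++ [p], PySem.Set.add st.2 p))
        st := by
  induction values generalizing st with
  | nil => rfl
  | cons v vs ih =>
    simp only [List.foldl_cons, List.filter_cons]
    by_cases h : PySem.Str.len v < 3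
    · rw [if_pos h]
      have : (decide (3 ≤ PySem.Str.len v)) = false := by
        simp only [PySem.Str.len_eq, String.length_toList] at h ⊢; simp; omega
      rw [this]
      simp only [Bool.false_eq_true, if_false]
      exact ih st
    · rw [if_neg h]
      have : (decide (3 ≤ PySem.Str.len v)) = true := by
        simp only [PySem.Str.len_eq, String.length_toList] at h ⊢; simp; omega
      rw [this]
      simp only [if_true, List.map_cons, List.foldl_cons]
      exact ih _

-- addPattern_py is the seen-fold over pvValues' filtered wrapped patterns
lemma addPattern_eq (st : List String × PySem.Set String) (raw : Option String) :
    addPattern_py st raw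
    = (((pvValues raw).filter (fun v => 3 ≤ PySem.Str.len v)).map
        (fun v => "%" ++ v ++ "%")).foldl
        (fun st p =>
          if PySem.Set.contains st.2 p then st
          else (st.1 ++ [p], PySem.Set.add st.2 p))
        st := by
  cases raw with
  | none => rfl
  | some r =>
    simp only [addPattern_py, pvValues]
    by_cases h : r = ""
    · rw [if_pos h, if_pos h]; rfl
    · rw [if_neg h, if_neg h]
      exact innerFold_eq _ st

-- the filtered wrapped values of one source ARE B's closed-form pattern list
lemma pats_eq (r : String) :
    ((pvValues (some r)).filter (fun v => 3 ≤ PySem.Str.len v)).map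
      (fun v => "%" ++ v ++ "%")
    = altPats (PySem.Str.lower r) := by
  by_cases hr : r = ""
  · subst hr; rfl
  · simp only [pvValues, if_neg hr]
    by_cases h4 : 4 < PySem.Str.len (PySem.Str.lower r)
    · rw [if_pos h4]
      have hlen : 4 < ((PySem.Str.lower r).toList.length : Int) := by
        simpa [PySem.Str.len_eq] using h4
      have hs1 : PySem.Str.len (PySem.Str.slice (PySem.Str.lower r) none (some 4)) = 4 := by
        rw [PySem.Str.len_eq, PySem.Str.toList_slice,
          PySem.Chars.slice_eq_listSlice,
          show ((4:Int)) = ((4:Nat):Int) by norm_num, PySem.List.slice_to_natCast,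
          List.length_take]
        push_cast
        omega
      have hs2 : PySem.Str.len (PySem.Str.slice (PySem.Str.lower r) (some (-4)) none) = 4 := by
        rw [PySem.Str.len_eq, PySem.Str.toList_slice,
          PySem.Chars.slice_eq_listSlice,
          PySem.List.slice_from_neg_ofNat _ 4 (by norm_num), List.length_drop]
        omega
      have c1 : (decide (3 ≤ PySem.Str.len (PySem.Str.lower r))) = true :=
        decide_eq_true (by omega)
      have c2 : (decide (3 ≤ PySem.Str.len
          (PySem.Str.slice (PySem.Str.lower r) none (some 4)))) = true :=
        decide_eq_true (by rw [hs1]; norm_num)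
      have c3 : (decide (3 ≤ PySem.Str.len
          (PySem.Str.slice (PySem.Str.lower r) (some (-4)) none))) = true :=
        decide_eq_true (by rw [hs2]; norm_num)
      simp only [List.filter_cons, List.filter_nil, c1, c2, c3, if_true,
        List.map_cons, List.map_nil]
      rw [altPats, if_neg (by omega), if_neg (by omega)]
    · rw [if_neg h4]
      by_cases h3 : PySem.Str.len (PySem.Str.lower r) < 3
      · have c1 : (decide (3 ≤ PySem.Str.len (PySem.Str.lower r))) = false :=
          decide_eq_false (by omega)
        simp only [List.filter_cons, List.filter_nil, c1, Bool.false_eq_true,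
          if_false, List.map_nil]
        rw [altPats, if_pos h3]
      · have c1 : (decide (3 ≤ PySem.Str.len (PySem.Str.lower r))) = true :=
          decide_eq_true (by omega)
        simp only [List.filter_cons, List.filter_nil, c1, if_true,
          List.map_cons, List.map_nil]
        rw [altPats, if_neg h3, if_pos (by omega)]

-- B's recursive dedup peels first occurrences exactly as a foldl of Set.add does
lemma altDedup_cons (p : String) (t : List String) :
    altDedup (p :: t) = p :: altDedup (t.filter (fun q => q != p)) := by
  rw [altDedup]


lemma foldl_add_eq (t : List String) :
    ∀ s : List String, t.foldl PySem.Set.add s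
      = s ++ altDedup (t.filter (fun p => !(s.contains p))) := by
  induction t with
  | nil => intro s; simp [altDedup]
  | cons p t ih =>
    intro s
    simp only [List.foldl_cons, List.filter_cons]
    by_cases hp : p ∈ s
    · have hc : s.contains p = true := by simpa using hp
      rw [PySem.Set.add_of_mem hp, hc]
      simpa using ih s
    · have hc : s.contains p = false := by simpa using hp
      rw [PySem.Set.add_of_not_mem hp, hc, ih (s ++ [p])]
      simp only [Bool.not_false, if_true, altDedup_cons, List.append_assoc,
        List.singleton_append, List.filter_filter]
      congr 2
      exact congrArg altDedup (List.filter_congr (fun q _ => by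
        by_cases hq : q = p <;> by_cases hqs : q ∈ s <;>
          simp [hq, hqs]))


-- Set.ofList is B's recursive dedup
lemma ofList_eq_altDedup (ps : List String) : PySem.Set.ofList ps = altDedup ps := by
  rw [PySem.Set.ofList_eq_foldl, foldl_add_eq]
  simp

theorem handle_search_patterns_eq (handle : Option String) :
    handle_search_patterns_py handle = handle_search_patterns_py_alt handle := by
  cases handle with
  | none => rfl
  | some h =>
    simp only [handle_search_patterns_py, handle_search_patterns_py_alt,
      clean_handle_py, normalize_handle_py]
    by_cases hs : PySem.Str.strip h = ""
    · rw [if_pos hs]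
      simp [hs]
    · rw [if_neg hs]
      rw [if_neg hs]
      have hguard : ¬ ((some (PySem.Str.strip h)).getD "" = "" ∧
          (some (String.ofList ((PySem.Str.lower (PySem.Str.strip h)).toList.flatMap pvTransChar))).getD "" = "") := by
        simp [hs]
      rw [if_neg hguard]
      rw [addPattern_eq, addPattern_eq]
      have hempty : (([], PySem.Set.empty) : List String × PySem.Set String)
          = (([] : List String), PySem.Set.ofList ([] : List String)) := rfl
      rw [hempty, ← List.foldl_append, seenFold]
      have hup : ∀ xs : List String, PySem.Set.update ([] : List String) xs
          = PySem.Set.ofList xs := by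
        intro xs; rw [PySem.Set.ofList_eq_foldl]; rfl
      rw [hup, ofList_eq_altDedup, pats_eq, pats_eq]

-- ===== VERDICT (by name: the statement is the Claim_ definition above) =====
theorem handle_search_patterns_py_spec : Claim_equal_handle_search_patterns_py := by
  intro handle _
  unfold Spec_handle_search_patterns_py
  exact handle_search_patterns_eq handle
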